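-- pv_equiv track=rewrite | github.com/AUSPEXI/aethergenai | scripts/math/benchmark_spinor.py | gp_blades
-- ===== SOURCE A (Python) =====
-- from typing import Tuple
--
-- SIG = [1]*8  # +1^8 metric
--
-- def popcount(x: int) -> int:
--     c = 0
--     while x:
--         x &= x-1
--         c += 1
--     return c
--
-- def gp_blades(a: int, b: int, sig=SIG) -> Tuple[int,int]:
--     sign = 1
--     res = a
--     for i in range(8):
--         m = 1<<i
--         if b & m:
--             lower = res & ((1<<i)-1)
--             if popcount(lower) % 2:
--                 sign = -sign
--             if res & m:
--                 res ^= m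
--                 if sig[i] < 0:
--                     sign = -sign
--             else:
--                 res |= m
--     return sign, res
-- ===== SOURCE B (Python) =====
-- SIG = [1]*8  # +1^8 metric
--
-- def gp_blades(a: int, b: int, sig=SIG):
--     bb = b & 0xFF
--     nb = bb.bit_count()
--     t = nb * (nb - 1) // 2
--     for i in range(8):
--         if (bb >> i) & 1:
--             t += (a & ((1 << i) - 1)).bit_count()
--     sign = -1 if t & 1 else 1
--     common = a & bb
--     for i in range(8):
--         if (common >> i) & 1 and sig[i] < 0:
--             sign = -sign
--     return sign, a ^ bb
-- ===== Notes on version B (the rewrite author's own statement) =====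
-- stated objective: alternative
-- what changed: Replaces A's single interleaved pass that toggles bits into an evolving accumulator (calling a hand-written popcount on the evolving value) by a direct XOR for the result blade plus two independent combinatorial counts for the sign: a closed-form within-b pair term nb*(nb-1)//2 and per-bit popcounts of a's low masks, with the metric flips applied in a separate pass over a & b & 0xFF.
import Mathlib
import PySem

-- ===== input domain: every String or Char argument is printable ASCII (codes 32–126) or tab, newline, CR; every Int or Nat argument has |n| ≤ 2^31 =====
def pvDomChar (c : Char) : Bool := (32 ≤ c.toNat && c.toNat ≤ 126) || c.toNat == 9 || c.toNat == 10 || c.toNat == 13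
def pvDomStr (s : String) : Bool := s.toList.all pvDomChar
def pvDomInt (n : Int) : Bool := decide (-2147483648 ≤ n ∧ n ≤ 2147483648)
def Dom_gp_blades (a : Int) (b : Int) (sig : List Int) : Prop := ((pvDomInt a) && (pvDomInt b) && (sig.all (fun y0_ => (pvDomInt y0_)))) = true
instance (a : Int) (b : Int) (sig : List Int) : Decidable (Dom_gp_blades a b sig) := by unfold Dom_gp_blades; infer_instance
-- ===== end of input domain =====

-- B replaces A's interleaved accumulator loop by a direct XOR for the blade plus two independent
-- combinatorial counts for the sign (closed-form pair term + per-bit popcounts); objective: alternative.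

-- ===== PORT A =====
-- Python's `while x: x &= x-1; c += 1` popcount, with fuel x.natAbs+1 (enough for every x ≥ 0,
-- the only values A feeds it: each iteration strictly decreases a positive x).
def pvPopcountAux : Nat → Int → Int → Int
  | 0, _, c => c
  | fuel+1, x, c => if x ≠ 0 then pvPopcountAux fuel (PySem.Int.band x (x-1)) (c+1) else c

def pvPopcount (x : Int) : Int := pvPopcountAux (x.natAbs + 1) x 0

def gp_blades (a : Int) (b : Int) (sig : List Int) : Int × Int :=
  (List.range 8).foldl (fun st i =>
    let sign := st.1
    let res := st.2
    let m : Int := 1 <<< i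
    if PySem.Int.band b m ≠ 0 then
      let lower := PySem.Int.band res ((1 <<< i) - 1)
      let sign := if PySem.Int.mod (pvPopcount lower) 2 ≠ 0 then -sign else sign
      if PySem.Int.band res m ≠ 0 then
        (if PySem.List.pyGetD sig (i : Int) 0 < 0 then -sign else sign, PySem.Int.bxor res m)
      else
        (sign, PySem.Int.bor res m)
    else (sign, res)) (1, a)

-- ===== PORT B =====
def gp_blades_alt (a : Int) (b : Int) (sig : List Int) : Int × Int :=
  let bb := PySem.Int.band b 255
  let nb : Int := PySem.Int.bitCount bb
  let t : Int := PySem.Int.floordiv (nb * (nb - 1)) 2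
  let t := (List.range 8).foldl (fun (t : Int) (i : Nat) =>
      if PySem.Int.band (bb >>> i) 1 ≠ 0 then
        t + (PySem.Int.bitCount (PySem.Int.band a ((1 <<< i) - 1)) : Int)
      else t) t
  let sign : Int := if PySem.Int.band t 1 ≠ 0 then -1 else 1
  let common := PySem.Int.band a bb
  let sign := (List.range 8).foldl (fun (s : Int) (i : Nat) =>
      if PySem.Int.band (common >>> i) 1 ≠ 0 ∧ PySem.List.pyGetD sig (i : Int) 0 < 0 then -s else s) sign
  (sign, PySem.Int.bxor a bb)

-- ===== PRECONDITION & SPEC =====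
-- Pre_ excludes exactly the inputs where Python A raises IndexError: sig too short for an index i < 8
-- with bit i set in a & b (B raises there too).
def Pre_gp_blades (a : Int) (b : Int) (sig : List Int) : Prop :=
  ∀ i : Nat, i < 8 → PySem.Int.band (PySem.Int.band a b) (1 <<< i) ≠ 0 → i < sig.length
instance (a : Int) (b : Int) (sig : List Int) : Decidable (Pre_gp_blades a b sig) := by
  unfold Pre_gp_blades; infer_instance

def pvWitness_gp_blades : Int × Int × List Int := (3, 5, [1, -1, 1, 1, 1, 1, 1, 1])

def Spec_gp_blades (a : Int) (b : Int) (sig : List Int) (out : Int × Int) : Prop := out = gp_blades_alt a b sig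
instance (a : Int) (b : Int) (sig : List Int) (out : Int × Int) : Decidable (Spec_gp_blades a b sig out) := by unfold Spec_gp_blades; infer_instance

-- ===== CLAIM (what is proved, stated in full; the proofs are below) =====
def Claim_equal_gp_blades : Prop := ∀ (a : Int) (b : Int) (sig : List Int), Dom_gp_blades a b sig → Pre_gp_blades a b sig → Spec_gp_blades a b sig (gp_blades a b sig)

-- ===== LEMMAS AND PROOFS =====

theorem decide_xor_iff (p q : Prop) [Decidable p] [Decidable q] :
    (decide p ^^ decide q) = decide (¬(p ↔ q)) := by
  by_cases hp : p <;> by_cases hq : q <;> simp [hp, hq]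

theorem xor_div_two (x z : Nat) : (x ^^^ z) / 2 = (x / 2) ^^^ (z / 2) := by
  apply Nat.eq_of_testBit_eq; intro j
  rw [Nat.testBit_div_two, Nat.testBit_xor, Nat.testBit_xor, Nat.testBit_div_two, Nat.testBit_div_two]

theorem land_div_two (x z : Nat) : (x &&& z) / 2 = (x / 2) &&& (z / 2) := by
  apply Nat.eq_of_testBit_eq; intro j
  rw [Nat.testBit_div_two, Nat.testBit_land, Nat.testBit_land, Nat.testBit_div_two, Nat.testBit_div_two]

theorem xor_mod_two (x z : Nat) : (x ^^^ z) % 2 = (x % 2 + z % 2) % 2 := by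
  have h := Nat.testBit_xor x z 0
  simp only [Nat.testBit_zero, decide_xor_iff, decide_eq_decide] at h
  omega

theorem land_mod_two (x z : Nat) : (x &&& z) % 2 = min (x % 2) (z % 2) := by
  have h := Nat.testBit_land x z 0
  simp only [Nat.testBit_zero, ← Bool.decide_and, decide_eq_decide] at h
  omega

theorem add_eq_xor_add_two_land : ∀ k x z : Nat, x < 2^k → z < 2^k → x + z = (x ^^^ z) + 2 * (x &&& z) := by
  intro k
  induction k with
  | zero =>
    intro x z hx hz
    simp [Nat.lt_one_iff] at hx hz
    subst hx; subst hz; rfl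
  | succ k ih =>
    intro x z hx hz
    have h2 : (2:Nat)^(k+1) = 2 * 2^k := by ring
    have ihh := ih (x / 2) (z / 2) (by omega) (by omega)
    have e1 := xor_div_two x z
    have e2 := land_div_two x z
    have e3 := xor_mod_two x z
    have e4 := land_mod_two x z
    omega

theorem add_of_land_eq_zero (x z : Nat) (h : x &&& z = 0) : x + z = x ^^^ z := by
  have hx : x < 2 ^ (x + z) := lt_of_le_of_lt (Nat.le_add_right x z) (Nat.lt_two_pow_self)
  have hz : z < 2 ^ (x + z) := lt_of_le_of_lt (Nat.le_add_left z x) (Nat.lt_two_pow_self)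
  have := add_eq_xor_add_two_land (x + z) x z hx hz
  omega

def pcN (m : Nat) : Nat := PySem.Int.bitCount (m : Int)

theorem pcN_zero : pcN 0 = 0 := by decide

theorem pcN_pos (m : Nat) (hm : 0 < m) : pcN m = m % 2 + pcN (m / 2) := PySem.Int.bitCount_natCast hm

theorem pcN_xor_parity : ∀ k x z : Nat, x < 2^k → z < 2^k → pcN (x ^^^ z) % 2 = (pcN x + pcN z) % 2 := by
  intro k
  induction k with
  | zero =>
    intro x z hx hz
    simp [Nat.lt_one_iff] at hx hz
    subst hx; subst hz; decide
  | succ k ih =>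
    intro x z hx hz
    have h2 : (2:Nat)^(k+1) = 2 * 2^k := by ring
    rcases Nat.eq_zero_or_pos x with hx0 | hx0
    · subst hx0; simp [pcN_zero]
    rcases Nat.eq_zero_or_pos z with hz0 | hz0
    · subst hz0; simp [pcN_zero]
    rcases Nat.eq_zero_or_pos (x ^^^ z) with hxz0 | hxz0
    · have hxz : x = z := by
        exact Nat.xor_eq_zero_iff.mp hxz0
      subst hxz
      simp [hxz0, pcN_zero]; omega
    have ihh := ih (x / 2) (z / 2) (by omega) (by omega)
    have e1 := xor_div_two x z
    have e3 := xor_mod_two x z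
    have p1 := pcN_pos x hx0
    have p2 := pcN_pos z hz0
    have p3 := pcN_pos (x ^^^ z) hxz0
    rw [e1] at p3
    omega


theorem testBit_ge8 (x j : Nat) (hx : x < 256) (hj : 8 ≤ j) : x.testBit j = false :=
  Nat.testBit_lt_two_pow (lt_of_lt_of_le hx (le_trans (by norm_num) (Nat.pow_le_pow_right (by norm_num) hj)))

theorem land_high (qq x y : Nat) (hx : x < 256) (hy : y < 256) : (2^8 * qq + x) &&& y = x &&& y := by
  apply Nat.eq_of_testBit_eq; intro j
  rw [Nat.testBit_land, Nat.testBit_land, Nat.testBit_two_pow_mul_add qq hx j]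
  by_cases hj : j < 8
  · rw [if_pos hj]
  · rw [if_neg hj]; simp [testBit_ge8 y j hy (by omega)]

theorem xor_high (qq x y : Nat) (hx : x < 256) (hy : y < 256) :
    (2^8 * qq + x) ^^^ y = 2^8 * qq + (x ^^^ y) := by
  apply Nat.eq_of_testBit_eq; intro j
  rw [Nat.testBit_xor, Nat.testBit_two_pow_mul_add qq hx j,
    Nat.testBit_two_pow_mul_add qq (Nat.xor_lt_two_pow (x := x) (y := y) (n := 8) (by norm_num at hx ⊢; omega) (by norm_num at hy ⊢; omega)) j]
  by_cases hj : j < 8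
  · rw [if_pos hj, if_pos hj, Nat.testBit_xor]
  · rw [if_neg hj, if_neg hj]; simp [testBit_ge8 y j hy (by omega)]

theorem lor_high (qq x y : Nat) (hx : x < 256) (hy : y < 256) :
    (2^8 * qq + x) ||| y = 2^8 * qq + (x ||| y) := by
  apply Nat.eq_of_testBit_eq; intro j
  rw [Nat.testBit_lor, Nat.testBit_two_pow_mul_add qq hx j,
    Nat.testBit_two_pow_mul_add qq (show x ||| y < 2^8 by
      have := Nat.or_lt_two_pow (x := x) (y := y) (n := 8) (by norm_num at hx ⊢; omega) (by norm_num at hy ⊢; omega); omega) j]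
  by_cases hj : j < 8
  · rw [if_pos hj, if_pos hj, Nat.testBit_lor]
  · rw [if_neg hj, if_neg hj]; simp [testBit_ge8 y j hy (by omega)]

-- 255 - x = 255 ^^^ x on bytes
theorem compl_byte (x : Nat) (hx : x < 256) : 255 - x = 255 ^^^ x := by
  have hdisj : (255 ^^^ x) &&& x = 0 := by
    apply Nat.eq_of_testBit_eq; intro j
    rw [Nat.testBit_land, Nat.testBit_xor]
    by_cases hj : j < 8
    · rw [show (255:Nat) = 2^8 - 1 by norm_num, Nat.testBit_two_pow_sub_one]
      cases hx1 : x.testBit j <;> simp [hj, hx1]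
    · simp [testBit_ge8 x j hx (by omega)]
  have hsum := add_of_land_eq_zero _ _ hdisj
  rw [Nat.xor_assoc, Nat.xor_self, Nat.xor_zero] at hsum
  omega

theorem sub_land_compl (x y : Nat) (hx : x < 256) (hy : y < 256) :
    y - ((255 ^^^ x) &&& y) = x &&& y := by
  have hdisj : (x &&& y) &&& ((255 ^^^ x) &&& y) = 0 := by
    apply Nat.eq_of_testBit_eq; intro j
    rw [Nat.testBit_land, Nat.testBit_land, Nat.testBit_land, Nat.testBit_xor]
    by_cases hj : j < 8
    · rw [show (255:Nat) = 2^8 - 1 by norm_num, Nat.testBit_two_pow_sub_one]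
      cases hx1 : x.testBit j <;> simp [hj, hx1]
    · simp [testBit_ge8 y j hy (by omega)]
  have hxor : (x &&& y) ^^^ ((255 ^^^ x) &&& y) = y := by
    apply Nat.eq_of_testBit_eq; intro j
    rw [Nat.testBit_xor, Nat.testBit_land, Nat.testBit_land, Nat.testBit_xor]
    by_cases hj : j < 8
    · rw [show (255:Nat) = 2^8 - 1 by norm_num, Nat.testBit_two_pow_sub_one]
      cases hx1 : x.testBit j <;> cases hy1 : y.testBit j <;> simp [hj, hx1, hy1]
    · simp [testBit_ge8 y j hy (by omega), testBit_ge8 x j hx (by omega)]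
  have := add_of_land_eq_zero _ _ hdisj
  omega

theorem add_land_compl (x y : Nat) (hx : x < 256) (hy : y < 256) :
    x + ((255 ^^^ x) &&& y) = x ||| y := by
  have hdisj : x &&& ((255 ^^^ x) &&& y) = 0 := by
    apply Nat.eq_of_testBit_eq; intro j
    rw [Nat.testBit_land, Nat.testBit_land, Nat.testBit_xor]
    by_cases hj : j < 8
    · rw [show (255:Nat) = 2^8 - 1 by norm_num, Nat.testBit_two_pow_sub_one]
      cases hx1 : x.testBit j <;> simp [hj, hx1]
    · simp [testBit_ge8 x j hx (by omega)]
  have hxor : x ^^^ ((255 ^^^ x) &&& y) = x ||| y := by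
    apply Nat.eq_of_testBit_eq; intro j
    rw [Nat.testBit_xor, Nat.testBit_land, Nat.testBit_xor, Nat.testBit_lor]
    by_cases hj : j < 8
    · rw [show (255:Nat) = 2^8 - 1 by norm_num, Nat.testBit_two_pow_sub_one]
      cases hx1 : x.testBit j <;> cases hy1 : y.testBit j <;> simp [hj, hx1, hy1]
    · simp [testBit_ge8 x j hx (by omega), testBit_ge8 y j hy (by omega)]
  have := add_of_land_eq_zero _ _ hdisj
  omega

-- mask step
theorem mask_succ (y n : Nat) : y &&& (2^(n+1) - 1) = (y &&& (2^n - 1)) ^^^ (y &&& 2^n) := by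
  apply Nat.eq_of_testBit_eq; intro j
  rw [Nat.testBit_xor, Nat.testBit_land, Nat.testBit_land, Nat.testBit_land,
    Nat.testBit_two_pow_sub_one, Nat.testBit_two_pow_sub_one, Nat.testBit_two_pow]
  rcases Nat.lt_trichotomy j n with hj | hj | hj
  · simp [hj, show j < n + 1 by omega, show n ≠ j by omega]
  · subst hj; simp [Nat.lt_succ_self]
  · simp [show ¬ (j < n) by omega, show ¬ (j < n+1) by omega, show n ≠ j by omega]

theorem band_decomp (q : Int) (x y : Nat) (hx : x < 256) (hy : y < 256) :
    PySem.Int.band (256 * q + (x : Int)) (y : Int) = ((x &&& y : Nat) : Int) := by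
  unfold PySem.Int.band
  by_cases hq : 0 ≤ 256 * q + (x : Int)
  · rw [if_pos hq, if_pos (by positivity)]
    have h1 : (256 * q + (x:Int)).toNat = 2^8 * q.toNat + x := by omega
    rw [h1, Int.toNat_natCast, land_high q.toNat x y hx hy]
  · rw [if_neg hq, if_pos (by positivity)]
    have h1 : (-(256 * q + (x:Int)) - 1).toNat = 2^8 * (-q-1).toNat + (255 - x) := by omega
    rw [Int.toNat_natCast, h1, Nat.land_comm y _, land_high _ _ y (by omega) hy, compl_byte x hx,
      sub_land_compl x y hx hy]

theorem bxor_decomp (q : Int) (x y : Nat) (hx : x < 256) (hy : y < 256) :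
    PySem.Int.bxor (256 * q + (x : Int)) (y : Int) = 256 * q + ((x ^^^ y : Nat) : Int) := by
  have hxy : x ^^^ y < 256 := by
    have := Nat.xor_lt_two_pow (x := x) (y := y) (n := 8) (by omega) (by omega); omega
  unfold PySem.Int.bxor
  by_cases hq : 0 ≤ 256 * q + (x : Int)
  · rw [if_pos hq, if_pos (by positivity)]
    have h1 : (256 * q + (x:Int)).toNat = 2^8 * q.toNat + x := by omega
    rw [h1, Int.toNat_natCast, xor_high q.toNat x y hx hy]
    have hq0 : 0 ≤ q := by omega
    push_cast
    omega
  · rw [if_neg hq, if_pos (by positivity)]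
    have h1 : (-(256 * q + (x:Int)) - 1).toNat = 2^8 * (-q-1).toNat + (255 - x) := by omega
    rw [Int.toNat_natCast, h1, compl_byte x hx, xor_high _ _ y (by
      have : (255:Nat) ^^^ x < 256 := by rw [← compl_byte x hx]; omega
      exact this) hy]
    rw [Nat.xor_assoc, ← compl_byte (x ^^^ y) hxy]
    have hq0 : q < 0 := by omega
    push_cast
    omega

theorem bor_decomp (q : Int) (x y : Nat) (hx : x < 256) (hy : y < 256) :
    PySem.Int.bor (256 * q + (x : Int)) (y : Int) = 256 * q + ((x ||| y : Nat) : Int) := by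
  have hxy : x ||| y < 256 := by
    have := Nat.or_lt_two_pow (x := x) (y := y) (n := 8) (by omega) (by omega); omega
  unfold PySem.Int.bor
  by_cases hq : 0 ≤ 256 * q + (x : Int)
  · rw [if_pos hq, if_pos (by positivity)]
    have h1 : (256 * q + (x:Int)).toNat = 2^8 * q.toNat + x := by omega
    rw [h1, Int.toNat_natCast, lor_high q.toNat x y hx hy]
    have hq0 : 0 ≤ q := by omega
    push_cast
    omega
  · rw [if_neg hq, if_pos (by positivity)]
    have h1 : (-(256 * q + (x:Int)) - 1).toNat = 2^8 * (-q-1).toNat + (255 - x) := by omega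
    rw [Int.toNat_natCast, h1, land_high _ _ y (by omega) hy]
    have hle : (255 - x) &&& y ≤ 255 - x := Nat.and_le_left
    have hkey : (255 - x) - ((255 - x) &&& y) = 255 - (x ||| y) := by
      rw [compl_byte x hx]
      have := add_land_compl x y hx hy
      have h2 : (255 ^^^ x) &&& y ≤ 255 ^^^ x := Nat.and_le_left
      have hc : 255 - x = 255 ^^^ x := compl_byte x hx
      omega
    have hq0 : q < 0 := by omega
    push_cast
    omega


set_option maxRecDepth 40000 in
theorem pvPopcount_eq_pcN : ∀ m : Nat, m < 256 → pvPopcount (m : Int) = (pcN m : Int) := by decide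

set_option maxRecDepth 40000 in
theorem pair_parity : ∀ y : Nat, y < 256 →
    ((List.range 8).foldl (fun t i => if y.testBit i then t + pcN (y &&& (2^i - 1)) else t) 0) % 2
      = (pcN y * (pcN y - 1) / 2) % 2 := by decide

theorem bitcond (m i : Nat) : (PySem.Int.band ((m : Int) >>> i) 1 ≠ 0) ↔ m.testBit i = true := by
  rw [show ((m:Int) >>> i) = ((m >>> i : Nat) : Int) by simp [Int.shiftRight_eq],
    show (1:Int) = ((1:Nat):Int) by norm_num, PySem.Int.band_natCast]
  rw [Nat.and_one_is_mod, Nat.shiftRight_eq_div_pow]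
  rw [Nat.testBit_eq_decide_div_mod_eq]
  cases h : decide (m / 2 ^ i % 2 = 1) <;> simp_all

theorem cast_and_two_pow_ne (y n : Nat) : (((y &&& 2^n : Nat) : Int) ≠ 0) ↔ y.testBit n = true := by
  rw [Nat.and_two_pow]
  cases h : y.testBit n <;> simp


def stepA (b : Int) (sig : List Int) (st : Int × Int) (i : Nat) : Int × Int :=
  let sign := st.1
  let res := st.2
  let m : Int := 1 <<< i
  if PySem.Int.band b m ≠ 0 then
    let lower := PySem.Int.band res ((1 <<< i) - 1)
    let sign := if PySem.Int.mod (pvPopcount lower) 2 ≠ 0 then -sign else sign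
    if PySem.Int.band res m ≠ 0 then
      (if PySem.List.pyGetD sig (i : Int) 0 < 0 then -sign else sign, PySem.Int.bxor res m)
    else
      (sign, PySem.Int.bor res m)
  else (sign, res)

theorem gp_blades_eq (a b : Int) (sig : List Int) :
    gp_blades a b sig = (List.range 8).foldl (stepA b sig) (1, a) := rfl

def cAF (r y : Nat) (sig : List Int) (n : Nat) : Int :=
  (if y.testBit n ∧ pcN ((r &&& (2^n - 1)) ^^^ (y &&& (2^n - 1))) % 2 = 1 then -1 else 1) *
  (if y.testBit n ∧ r.testBit n ∧ PySem.List.pyGetD sig (n : Int) 0 < 0 then -1 else 1)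

theorem one_shl (n : Nat) : (1 <<< n : Nat) = 2^n := Nat.one_shiftLeft n

theorem lor_eq_xor_single (x n : Nat) (h : x.testBit n = false) : x ||| 2^n = x ^^^ 2^n := by
  apply Nat.eq_of_testBit_eq; intro j
  rw [Nat.testBit_lor, Nat.testBit_xor]
  by_cases hj : j = n
  · subst hj; simp [h]
  · have h2 : ((2:Nat)^n).testBit j = false := by
      rw [Nat.testBit_two_pow]; simp [Ne.symm hj]
    simp [h2]

theorem stepA_eq (b : Int) (sig : List Int) (qb : Int) (y : Nat)
    (hb : b = 256 * qb + (y : Int)) (hy : y < 256)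
    (q : Int) (r : Nat) (hr : r < 256) (n : Nat) (hn : n < 8) (s : Int) :
    stepA b sig (s, 256 * q + ((r ^^^ (y &&& (2^n - 1)) : Nat) : Int)) n
      = (cAF r y sig n * s, 256 * q + ((r ^^^ (y &&& (2^(n+1) - 1)) : Nat) : Int)) := by
  have h2n : (2:Nat)^n < 256 :=
    lt_of_le_of_lt (Nat.pow_le_pow_right (by norm_num) (show n ≤ 7 by omega)) (by norm_num)
  have hL : y &&& (2^n - 1) < 2^n := by
    have : y &&& (2^n - 1) ≤ 2^n - 1 := Nat.and_le_right
    have : (0:Nat) < 2^n := Nat.two_pow_pos n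
    omega
  have hLbit : (y &&& (2^n - 1)).testBit n = false := Nat.testBit_lt_two_pow hL
  have hx : r ^^^ (y &&& (2^n - 1)) < 256 := by
    have := Nat.xor_lt_two_pow (x := r) (y := y &&& (2^n - 1)) (n := 8) (by omega) (by omega)
    omega
  have hxbit : (r ^^^ (y &&& (2^n - 1))).testBit n = r.testBit n := by
    rw [Nat.testBit_xor, hLbit, Bool.xor_false]
  unfold stepA
  simp only [hb, one_shl]
  rw [band_decomp qb y (2^n) hy h2n]
  by_cases hbit : y.testBit n
  · rw [if_pos (by rw [cast_and_two_pow_ne]; exact hbit)]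
    have hmask1 : ((2^n : Nat) : Int) - 1 = (((2^n - 1 : Nat)) : Int) := by
      rw [Nat.cast_sub (Nat.two_pow_pos n)]; norm_num
    rw [hmask1, band_decomp q (r ^^^ (y &&& (2^n - 1))) (2^n - 1) hx (by omega)]
    rw [Nat.and_xor_distrib_right (a := r) (b := y &&& (2^n - 1)) (c := 2^n - 1)]
    have hLL : (y &&& (2^n - 1)) &&& (2^n - 1) = y &&& (2^n - 1) := by
      rw [Nat.and_assoc, Nat.and_self]
    rw [hLL]
    rw [pvPopcount_eq_pcN _ (by
      have := Nat.xor_lt_two_pow (x := r &&& (2^n - 1)) (y := y &&& (2^n - 1)) (n := 8)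
        (by have : r &&& (2^n-1) ≤ r := Nat.and_le_left; omega) (by omega)
      omega)]
    rw [show (2:Int) = ((2:Nat):Int) by norm_num, PySem.Int.mod_natCast]
    have hpar : ((((pcN ((r &&& (2^n-1)) ^^^ (y &&& (2^n-1))) % 2 : Nat)) : Int) ≠ 0)
        ↔ pcN ((r &&& (2^n-1)) ^^^ (y &&& (2^n-1))) % 2 = 1 := by
      constructor
      · intro h; omega
      · intro h; omega
    rw [band_decomp q (r ^^^ (y &&& (2^n - 1))) (2^n) hx h2n]
    -- metric branch condition
    by_cases hrbit : r.testBit n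
    · rw [if_pos (by rw [cast_and_two_pow_ne, hxbit]; exact hrbit)]
      rw [bxor_decomp q _ _ hx h2n]
      have hres : (r ^^^ (y &&& (2^n - 1))) ^^^ 2^n = r ^^^ (y &&& (2^(n+1) - 1)) := by
        rw [mask_succ, Nat.and_two_pow, hbit]
        simp [Nat.xor_assoc]
      rw [hres, Prod.mk.injEq]
      refine ⟨?_, rfl⟩
      · -- sign component
        simp only [cAF, hbit, hrbit, true_and]
        simp only [hpar]
        by_cases hpc : pcN ((r &&& (2^n-1)) ^^^ (y &&& (2^n-1))) % 2 = 1 <;>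
          by_cases hsig : PySem.List.pyGetD sig (n : Int) 0 < 0 <;>
            simp only [hpc, hsig, ite_true, ite_false, iff_true, iff_false, if_true, if_false] <;> ring
    · rw [if_neg (by rw [cast_and_two_pow_ne, hxbit]; simp [hrbit])]
      rw [bor_decomp q _ _ hx h2n]
      have hres : (r ^^^ (y &&& (2^n - 1))) ||| 2^n = r ^^^ (y &&& (2^(n+1) - 1)) := by
        rw [lor_eq_xor_single _ _ (by rw [hxbit]; simp [hrbit]), mask_succ, Nat.and_two_pow, hbit]
        simp [Nat.xor_assoc]
      rw [hres, Prod.mk.injEq]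
      refine ⟨?_, rfl⟩
      · simp only [cAF, hbit, hrbit, true_and]
        simp only [hpar]
        by_cases hpc : pcN ((r &&& (2^n-1)) ^^^ (y &&& (2^n-1))) % 2 = 1 <;>
          simp only [hpc, hrbit, Bool.false_eq_true, false_and, and_false, ite_true, ite_false, if_true, if_false] <;> ring
  · rw [if_neg (by rw [Ne, not_not]; by_contra hc; exact hbit ((cast_and_two_pow_ne y n).mp hc))]
    have hres : y &&& (2^(n+1) - 1) = y &&& (2^n - 1) := by
      rw [mask_succ, Nat.and_two_pow]
      simp [hbit]
    rw [hres, Prod.mk.injEq]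
    exact ⟨by simp [cAF, hbit], rfl⟩

theorem loopA (b : Int) (sig : List Int) (qb : Int) (y : Nat)
    (hb : b = 256 * qb + (y : Int)) (hy : y < 256) (q : Int) (r : Nat) (hr : r < 256) :
    ∀ n, n ≤ 8 → (List.range n).foldl (stepA b sig) (1, 256 * q + (r : Int)) =
      (((List.range n).map (cAF r y sig)).prod, 256 * q + ((r ^^^ (y &&& (2^n - 1)) : Nat) : Int)) := by
  intro n
  induction n with
  | zero => intro _; norm_num
  | succ n ih =>
    intro hn
    rw [List.range_succ, List.foldl_append, List.map_append, List.prod_append, ih (by omega)]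
    simp only [List.foldl_cons, List.foldl_nil, List.map_cons, List.map_nil, List.prod_cons,
      List.prod_nil, mul_one]
    rw [stepA_eq b sig qb y hb hy q r hr n (by omega)]
    rw [mul_comm]

def stepT (a bb : Int) (t : Int) (i : Nat) : Int :=
  if PySem.Int.band (bb >>> i) 1 ≠ 0 then
    t + (PySem.Int.bitCount (PySem.Int.band a ((1 <<< i) - 1)) : Int)
  else t

def stepM (common : Int) (sig : List Int) (s : Int) (i : Nat) : Int :=
  if PySem.Int.band (common >>> i) 1 ≠ 0 ∧ PySem.List.pyGetD sig (i : Int) 0 < 0 then -s else s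

theorem gp_blades_alt_eq (a b : Int) (sig : List Int) : gp_blades_alt a b sig =
    ((List.range 8).foldl (stepM (PySem.Int.band a (PySem.Int.band b 255)) sig)
      (if PySem.Int.band
            ((List.range 8).foldl (stepT a (PySem.Int.band b 255))
              (PySem.Int.floordiv ((PySem.Int.bitCount (PySem.Int.band b 255) : Int) *
                ((PySem.Int.bitCount (PySem.Int.band b 255) : Int) - 1)) 2)) 1 ≠ 0
        then -1 else 1),
      PySem.Int.bxor a (PySem.Int.band b 255)) := by
  unfold gp_blades_alt stepT stepM
  rfl


theorem byte_and_255 (y : Nat) (hy : y < 256) : y &&& 255 = y := by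
  rw [show (255:Nat) = 2^8 - 1 by norm_num, Nat.and_two_pow_sub_one_eq_mod, Nat.mod_eq_of_lt hy]

def TNf (r y : Nat) (n : Nat) : Nat :=
  (List.range n).foldl (fun t i => if y.testBit i then t + pcN (r &&& (2^i - 1)) else t) 0

def mBF (r y : Nat) (sig : List Int) (n : Nat) : Int :=
  if (r &&& y).testBit n ∧ PySem.List.pyGetD sig (n : Int) 0 < 0 then -1 else 1

theorem loopT (a : Int) (q : Int) (r : Nat) (ha : a = 256 * q + (r : Int)) (hr : r < 256)
    (y : Nat) (t0 : Nat) :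
    ∀ n, n ≤ 8 → (List.range n).foldl (stepT a ((y : Nat) : Int)) (t0 : Int) = ((t0 + TNf r y n : Nat) : Int) := by
  intro n
  induction n with
  | zero => simp [TNf]
  | succ n ih =>
    intro hn
    rw [List.range_succ, List.foldl_append, ih (by omega)]
    show stepT a ((y : Nat) : Int) _ n = _
    have hTN : TNf r y (n+1) = if y.testBit n then TNf r y n + pcN (r &&& (2^n - 1)) else TNf r y n := by
      unfold TNf
      rw [List.range_succ, List.foldl_append]
      simp only [List.foldl_cons, List.foldl_nil]
    unfold stepT
    have hmask1 : ((1 <<< n : Nat) : Int) - 1 = (((2^n - 1 : Nat)) : Int) := by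
      rw [one_shl, Nat.cast_sub (Nat.two_pow_pos n)]; norm_num
    rw [hmask1, ha, band_decomp q r (2^n - 1) hr (by
      have := Nat.two_pow_pos n
      have h2n : (2:Nat)^n ≤ 2^8 := Nat.pow_le_pow_right (by norm_num) (by omega)
      norm_num at h2n ⊢; omega)]
    by_cases hbit : y.testBit n
    · rw [if_pos ((bitcond y n).mpr hbit), hTN, if_pos hbit]
      show ((t0 + TNf r y n : Nat) : Int) + ((pcN (r &&& (2^n - 1)) : Nat) : Int) = _
      push_cast; ring
    · rw [if_neg (by rw [bitcond]; simp [hbit]), hTN, if_neg hbit]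

theorem foldl_flip (c : Nat → Prop) [DecidablePred c] :
    ∀ (l : List Nat) (s0 : Int),
      l.foldl (fun s i => if c i then -s else s) s0 = (l.map fun i => if c i then (-1:Int) else 1).prod * s0 := by
  intro l
  induction l with
  | nil => intro s0; simp
  | cons hd tl ih =>
    intro s0
    simp only [List.foldl_cons, List.map_cons, List.prod_cons]
    by_cases h : c hd
    · rw [if_pos h, if_pos h, ih]; ring
    · rw [if_neg h, if_neg h, ih]; ring


def pAF (r y : Nat) (n : Nat) : Int :=
  if y.testBit n ∧ pcN ((r &&& (2^n - 1)) ^^^ (y &&& (2^n - 1))) % 2 = 1 then -1 else 1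

def mAF (r y : Nat) (sig : List Int) (n : Nat) : Int :=
  if y.testBit n ∧ r.testBit n ∧ PySem.List.pyGetD sig (n : Int) 0 < 0 then -1 else 1

theorem cAF_split (r y : Nat) (sig : List Int) :
    cAF r y sig = fun n => pAF r y n * mAF r y sig n := rfl

theorem prod_ite_neg_one (c : Nat → Prop) [DecidablePred c] :
    ∀ l : List Nat,
      (l.map fun i => if c i then (-1:Int) else 1).prod
        = if (l.countP fun i => decide (c i)) % 2 = 1 then -1 else 1 := by
  intro l
  induction l with
  | nil => simp
  | cons hd tl ih =>
    simp only [List.map_cons, List.prod_cons, List.countP_cons, ih]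
    by_cases h : c hd
    · rw [if_pos h]
      have hd1 : (if decide (c hd) = true then 1 else 0) = 1 := by simp [h]
      rw [hd1]
      rcases Nat.mod_two_eq_zero_or_one (tl.countP fun i => decide (c i)) with hm | hm <;>
        rw [show ∀ m : Nat, (m + 1) % 2 = (m % 2 + 1) % 2 from fun m => by omega] <;>
          rw [hm] <;> norm_num <;> ring
    · rw [if_neg h]
      have hd1 : (if decide (c hd) = true then 1 else 0) = 0 := by simp [h]
      rw [hd1]
      simp
  -- done

def VNf (y : Nat) (n : Nat) : Nat :=
  (List.range n).foldl (fun t i => if y.testBit i then t + pcN (y &&& (2^i - 1)) else t) 0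

theorem count_parity (r y : Nat) (hr : r < 256) (hy : y < 256) :
    ∀ n, n ≤ 8 →
      ((List.range n).countP fun i =>
          decide (y.testBit i ∧ pcN ((r &&& (2^i - 1)) ^^^ (y &&& (2^i - 1))) % 2 = 1)) % 2
        = (TNf r y n + VNf y n) % 2 := by
  intro n
  induction n with
  | zero => intro _; simp [TNf, VNf]
  | succ n ih =>
    intro hn
    have hTN : TNf r y (n+1) = if y.testBit n then TNf r y n + pcN (r &&& (2^n - 1)) else TNf r y n := by
      unfold TNf; rw [List.range_succ, List.foldl_append]; simp only [List.foldl_cons, List.foldl_nil]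
    have hVN : VNf y (n+1) = if y.testBit n then VNf y n + pcN (y &&& (2^n - 1)) else VNf y n := by
      unfold VNf; rw [List.range_succ, List.foldl_append]; simp only [List.foldl_cons, List.foldl_nil]
    rw [List.range_succ, List.countP_append]
    simp only [List.countP_cons, List.countP_nil]
    have hih := ih (by omega)
    have hxp : pcN ((r &&& (2^n - 1)) ^^^ (y &&& (2^n - 1))) % 2
        = (pcN (r &&& (2^n - 1)) + pcN (y &&& (2^n - 1))) % 2 := by
      apply pcN_xor_parity 8
      · have h1 : r &&& (2^n - 1) ≤ r := Nat.and_le_left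
        omega
      · have h1 : y &&& (2^n - 1) ≤ y := Nat.and_le_left
        omega
    by_cases hbit : y.testBit n
    · have hTN' : TNf r y (n+1) = TNf r y n + pcN (r &&& (2^n - 1)) := by rw [hTN, if_pos hbit]
      have hVN' : VNf y (n+1) = VNf y n + pcN (y &&& (2^n - 1)) := by rw [hVN, if_pos hbit]
      rw [hTN', hVN']
      by_cases hodd : pcN ((r &&& (2^n - 1)) ^^^ (y &&& (2^n - 1))) % 2 = 1
      · have hc : (decide (y.testBit n = true ∧ pcN ((r &&& (2^n - 1)) ^^^ (y &&& (2^n - 1))) % 2 = 1)) = true := by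
          rw [decide_eq_true_eq]; exact ⟨hbit, hodd⟩
        rw [hc, show (if (true = true) then (1:Nat) else 0) = 1 from rfl]
        omega
      · have hc : (decide (y.testBit n = true ∧ pcN ((r &&& (2^n - 1)) ^^^ (y &&& (2^n - 1))) % 2 = 1)) = false := by
          rw [decide_eq_false_iff_not]; intro hand; exact hodd hand.2
        rw [hc, show (if (false = true) then (1:Nat) else 0) = 0 from rfl]
        omega
    · have hTN' : TNf r y (n+1) = TNf r y n := by rw [hTN, if_neg hbit]
      have hVN' : VNf y (n+1) = VNf y n := by rw [hVN, if_neg hbit]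
      rw [hTN', hVN']
      have hc : (decide (y.testBit n = true ∧ pcN ((r &&& (2^n - 1)) ^^^ (y &&& (2^n - 1))) % 2 = 1)) = false := by
        rw [decide_eq_false_iff_not]; intro hand; exact hbit hand.1
      rw [hc, show (if (false = true) then (1:Nat) else 0) = 0 from rfl]
      omega

theorem t0_eq (nb : Nat) :
    PySem.Int.floordiv ((nb : Int) * ((nb : Int) - 1)) 2 = ((nb * (nb - 1) / 2 : Nat) : Int) := by
  cases nb with
  | zero => norm_num [show ((0:Nat):Int) * (((0:Nat):Int) - 1) = ((0:Nat):Int) by norm_num]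
  | succ k =>
    have h1 : ((k+1 : Nat) : Int) * (((k+1 : Nat) : Int) - 1) = (((k+1) * k : Nat) : Int) := by
      push_cast; ring
    rw [h1, show (2:Int) = ((2:Nat):Int) by norm_num, PySem.Int.floordiv_natCast]
    norm_num

theorem band_one_ne (T : Nat) : (PySem.Int.band ((T : Nat) : Int) 1 ≠ 0) ↔ T % 2 = 1 := by
  rw [show (1:Int) = ((1:Nat):Int) by norm_num, PySem.Int.band_natCast, Nat.and_one_is_mod]
  constructor
  · intro h; omega
  · intro h; omega

theorem ports_agree (a b : Int) (sig : List Int) : gp_blades a b sig = gp_blades_alt a b sig := by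
  -- decompose a and b into 256*quotient + low byte
  have hr0 : 0 ≤ PySem.Int.mod a 256 := PySem.Int.mod_nonneg a (by norm_num)
  have hrl : PySem.Int.mod a 256 < 256 := PySem.Int.mod_lt a (by norm_num)
  have hy0 : 0 ≤ PySem.Int.mod b 256 := PySem.Int.mod_nonneg b (by norm_num)
  have hyl : PySem.Int.mod b 256 < 256 := PySem.Int.mod_lt b (by norm_num)
  set q := PySem.Int.floordiv a 256 with hqdef
  set qb := PySem.Int.floordiv b 256 with hqbdef
  set r := (PySem.Int.mod a 256).toNat with hrdef
  set y := (PySem.Int.mod b 256).toNat with hydef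
  have ha : a = 256 * q + (r : Int) := by
    have := PySem.Int.floordiv_mul_add_mod a 256
    rw [hrdef, Int.toNat_of_nonneg hr0]
    omega
  have hb : b = 256 * qb + (y : Int) := by
    have := PySem.Int.floordiv_mul_add_mod b 256
    rw [hydef, Int.toNat_of_nonneg hy0]
    omega
  have hr : r < 256 := by omega
  have hy : y < 256 := by omega
  -- A side
  have hA := loopA b sig qb y hb hy q r hr 8 (by omega)
  rw [gp_blades_eq, ha, hA]
  have hyfull : y &&& (2^8 - 1) = y := by
    rw [Nat.and_two_pow_sub_one_eq_mod, Nat.mod_eq_of_lt (by omega)]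
  rw [hyfull]
  -- B side
  rw [gp_blades_alt_eq]
  have hbb : PySem.Int.band b 255 = ((y : Nat) : Int) := by
    rw [hb, show (255:Int) = ((255:Nat):Int) by norm_num, band_decomp qb y 255 hy (by norm_num),
      byte_and_255 y hy]
  rw [hbb]
  have hnb : PySem.Int.bitCount ((y : Nat) : Int) = pcN y := rfl
  rw [hnb, t0_eq, loopT (256 * q + (r : Int)) q r rfl hr y (pcN y * (pcN y - 1) / 2) 8 (by omega)]
  rw [if_congr (band_one_ne (pcN y * (pcN y - 1) / 2 + TNf r y 8)) rfl rfl]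
  rw [band_decomp q r y hr hy]
  -- metric fold of B
  have hM := foldl_flip (fun (i : Nat) => PySem.Int.band ((((r &&& y : Nat)) : Int) >>> i) 1 ≠ 0 ∧
      PySem.List.pyGetD sig (i : Int) 0 < 0) (List.range 8)
  have hstep : stepM (((r &&& y : Nat)) : Int) sig = (fun (s : Int) (i : Nat) =>
      if PySem.Int.band ((((r &&& y : Nat)) : Int) >>> i) 1 ≠ 0 ∧
        PySem.List.pyGetD sig (i : Int) 0 < 0 then -s else s) := by
    funext s i; rfl
  rw [hstep, hM]
  -- identify B's metric factors with mBF
  have hmap : ((List.range 8).map fun (i : Nat) =>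
      if PySem.Int.band ((((r &&& y : Nat)) : Int) >>> i) 1 ≠ 0 ∧
        PySem.List.pyGetD sig (i : Int) 0 < 0 then (-1:Int) else 1) = (List.range 8).map (mBF r y sig) := by
    apply List.map_congr_left
    intro i _
    unfold mBF
    exact if_congr (and_congr_left' (bitcond (r &&& y) i)) rfl rfl
  rw [hmap]
  -- A's factors split into parity part and metric part
  rw [cAF_split]
  rw [show ((List.range 8).map fun n => pAF r y n * mAF r y sig n).prod
      = ((List.range 8).map (pAF r y)).prod * ((List.range 8).map (mAF r y sig)).prod from
    List.prod_map_mul]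
  -- metric parts agree
  have hmAB : (List.range 8).map (mAF r y sig) = (List.range 8).map (mBF r y sig) := by
    apply List.map_congr_left
    intro i _
    unfold mAF mBF
    exact if_congr (by rw [Nat.testBit_land, Bool.and_eq_true]; tauto) rfl rfl
  rw [hmAB]
  -- parity part equals B's initial sign
  have hpA : ((List.range 8).map (pAF r y)).prod
      = if ((List.range 8).countP fun i =>
            decide (y.testBit i = true ∧ pcN ((r &&& (2^i - 1)) ^^^ (y &&& (2^i - 1))) % 2 = 1)) % 2 = 1
        then (-1:Int) else 1 := by
    exact prod_ite_neg_one _ (List.range 8)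
  rw [hpA]
  have hcp := count_parity r y hr hy 8 (by omega)
  have hvp : VNf y 8 % 2 = (pcN y * (pcN y - 1) / 2) % 2 := pair_parity y hy
  have hcond : (((List.range 8).countP fun i =>
        decide (y.testBit i = true ∧ pcN ((r &&& (2^i - 1)) ^^^ (y &&& (2^i - 1))) % 2 = 1)) % 2 = 1)
      ↔ ((pcN y * (pcN y - 1) / 2 + TNf r y 8) % 2 = 1) := by
    omega
  rw [if_congr hcond rfl rfl]
  rw [bxor_decomp q r y hr hy]
  rw [mul_comm]

-- ===== VERDICT (by name: the statement is the Claim_ definition above) =====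
theorem gp_blades_spec : Claim_equal_gp_blades := by
  intro a b sig _ _
  unfold Spec_gp_blades
  exact ports_agree a b sig
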